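-- pv_equiv track=rewrite | github.com/Sharon131/masters_project | python_tests/test1.py | cummulative_inverse
-- ===== SOURCE A (Python) =====
-- def cummulative_inverse(cumm_freqs: dict, slot: int):
--     items = sorted(cumm_freqs.items(), key=lambda x: x[1])
--     prev_key = items[0][0]
--     last_key = items[-1][0]
--     for key, value in items:
--         if slot < value:
--             return prev_key
--         prev_key = key
--
--     return last_key
-- ===== SOURCE B (Python) =====
-- def cummulative_inverse(cumm_freqs: dict, slot: int):
--     items = sorted(cumm_freqs.items(), key=lambda x: x[1])
--     lo, hi = 0, len(items)
--     while lo < hi: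
--         mid = (lo + hi) // 2
--         if slot < items[mid][1]:
--             hi = mid
--         else:
--             lo = mid + 1
--     return items[max(lo - 1, 0)][0]
-- ===== Notes on version B (the rewrite author's own statement) =====
-- stated objective: alternative
-- what changed: The linear prev_key scan over the value-sorted items is replaced by a binary search (bisect_right style while-loop) for the insertion point of slot, indexing items[max(pos-1,0)] directly (the sort dominates, so overall cost is unchanged).
-- outside the precondition, e.g. on cummulative_inverse({}, 0): A raises IndexError, B raises IndexError
import Mathlib
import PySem

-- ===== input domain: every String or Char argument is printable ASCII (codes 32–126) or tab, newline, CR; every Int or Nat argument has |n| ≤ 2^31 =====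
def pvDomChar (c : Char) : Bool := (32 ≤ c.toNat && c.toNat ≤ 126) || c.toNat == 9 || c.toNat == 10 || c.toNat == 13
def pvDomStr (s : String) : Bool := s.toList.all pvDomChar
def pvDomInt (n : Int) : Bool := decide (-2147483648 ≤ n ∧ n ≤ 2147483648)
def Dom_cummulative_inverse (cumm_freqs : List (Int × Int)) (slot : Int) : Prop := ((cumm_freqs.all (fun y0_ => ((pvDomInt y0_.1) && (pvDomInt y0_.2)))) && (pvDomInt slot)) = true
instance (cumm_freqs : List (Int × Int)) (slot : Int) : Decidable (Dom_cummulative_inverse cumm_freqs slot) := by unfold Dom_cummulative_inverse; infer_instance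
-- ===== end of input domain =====

-- B replaces A's linear prev_key scan over the sorted items with a hand-rolled
-- binary search for the insertion point of slot among the values (alternative algorithm, same result).

-- ===== PORT A =====
-- the 'for key, value in items' loop with its prev_key accumulator and final 'return last_key'
def pvLoopA (slot : Int) : List (Int × Int) → Int → Int → Int
  | [], _, last_key => last_key
  | (key, value) :: rest, prev_key, last_key =>
    if slot < value then prev_key else pvLoopA slot rest key last_key

def cummulative_inverse (cumm_freqs : List (Int × Int)) (slot : Int) : Int :=
  let items := PySem.List.sorted (PySem.Dict.ofList cumm_freqs).items (fun x => x.2)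
  match PySem.List.pyGet? items 0, PySem.List.pyGet? items (-1) with
  | some first, some last => pvLoopA slot items first.1 last.1
  | _, _ => 0  -- items[0] raises IndexError (empty dict); excluded by Pre_

-- ===== PORT B =====
-- the while-loop binary search of Source B (lo, hi are in-range indices; getD stands for items[mid])
def pvBisectB (items : List (Int × Int)) (slot : Int) (lo hi : Nat) : Nat :=
  if _h : lo < hi then
    let mid := (lo + hi) / 2
    if slot < (items.getD mid (0, 0)).2 then pvBisectB items slot lo mid
    else pvBisectB items slot (mid + 1) hi
  else lo
termination_by hi - lo
decreasing_by all_goals omega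

def cummulative_inverse_alt (cumm_freqs : List (Int × Int)) (slot : Int) : Int :=
  let items := PySem.List.sorted (PySem.Dict.ofList cumm_freqs).items (fun x => x.2)
  let lo := pvBisectB items slot 0 items.length
  match PySem.List.pyGet? items (max ((lo : Int) - 1) 0) with
  | some p => p.1
  | none => 0  -- items[...] raises IndexError (empty dict); excluded by Pre_

-- ===== PRECONDITION & SPEC =====
-- Pre_ excludes only the empty dict, on which A (and B) raise IndexError at items[0].
def Pre_cummulative_inverse (cumm_freqs : List (Int × Int)) (_slot : Int) : Prop := cumm_freqs ≠ []
instance (cumm_freqs : List (Int × Int)) (slot : Int) : Decidable (Pre_cummulative_inverse cumm_freqs slot) := by unfold Pre_cummulative_inverse; infer_instance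
def pvWitness_cummulative_inverse : (List (Int × Int)) × Int := ([(1, 3), (2, 7)], 4)

def Spec_cummulative_inverse (cumm_freqs : List (Int × Int)) (slot : Int) (out : Int) : Prop := out = cummulative_inverse_alt cumm_freqs slot
instance (cumm_freqs : List (Int × Int)) (slot : Int) (out : Int) : Decidable (Spec_cummulative_inverse cumm_freqs slot out) := by unfold Spec_cummulative_inverse; infer_instance

-- ===== CLAIM (what is proved, stated in full; the proofs are below) =====
def Claim_equal_cummulative_inverse : Prop := ∀ (cumm_freqs : List (Int × Int)) (slot : Int), Dom_cummulative_inverse cumm_freqs slot → Pre_cummulative_inverse cumm_freqs slot → Spec_cummulative_inverse cumm_freqs slot (cummulative_inverse cumm_freqs slot)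

-- ===== LEMMAS AND PROOFS =====

-- dict insertion never empties the item list
lemma pv_insert_items_ne (d : PySem.Dict Int Int) (k v : Int) :
    (PySem.Dict.insert d k v).items ≠ [] := by
  by_cases h : d.contains k
  · simp only [PySem.Dict.insert, h, if_pos]
    have hd : d.items ≠ [] := by
      intro he
      simp [PySem.Dict.contains, he] at h
    simpa using hd
  · simp [PySem.Dict.insert, h]

lemma pv_update_items_ne (ps : List (Int × Int)) (d : PySem.Dict Int Int)
    (hd : d.items ≠ []) : (PySem.Dict.update d ps).items ≠ [] := by
  induction ps generalizing d with
  | nil => exact hd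
  | cons p rest ih =>
      exact ih (PySem.Dict.insert d p.1 p.2) (pv_insert_items_ne d p.1 p.2)

lemma pv_ofList_items_ne (cf : List (Int × Int)) (h : cf ≠ []) :
    (PySem.Dict.ofList cf).items ≠ [] := by
  cases cf with
  | nil => exact absurd rfl h
  | cons p rest =>
      show (PySem.Dict.update PySem.Dict.empty (p :: rest)).items ≠ []
      have : PySem.Dict.update PySem.Dict.empty (p :: rest)
          = PySem.Dict.update (PySem.Dict.empty.insert p.1 p.2) rest := rfl
      rw [this]
      exact pv_update_items_ne rest _ (pv_insert_items_ne _ _ _)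

-- elements of a value-sorted list are monotone in their second component
lemma pv_mono (l : List (Int × Int)) (hp : List.Pairwise (fun a b => a.2 ≤ b.2) l)
    {i j : Nat} (hj : j < l.length) (hij : i ≤ j) : (l[i]'(lt_of_le_of_lt hij hj)).2 ≤ l[j].2 := by
  rcases lt_or_eq_of_le hij with h | h
  · exact (List.pairwise_iff_getElem.mp hp) i j _ hj h
  · subst h; exact le_refl _

-- the binary search returns the count of values ≤ slot (insertion point)
lemma pvBisectB_spec (items : List (Int × Int)) (slot : Int)
    (hp : List.Pairwise (fun a b => a.2 ≤ b.2) items) :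
    ∀ fuel lo hi, hi - lo ≤ fuel → lo ≤ hi → hi ≤ items.length →
    (∀ j (hj : j < items.length), j < lo → items[j].2 ≤ slot) →
    (∀ j (hj : j < items.length), hi ≤ j → slot < items[j].2) →
    pvBisectB items slot lo hi ≤ items.length ∧
    (∀ j (hj : j < items.length), j < pvBisectB items slot lo hi → items[j].2 ≤ slot) ∧
    (∀ j (hj : j < items.length), pvBisectB items slot lo hi ≤ j → slot < items[j].2) := by
  intro fuel
  induction fuel with
  | zero =>
      intro lo hi hfl hlh hhl hlow hhigh
      have hEq : lo = hi := by omega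
      rw [pvBisectB]
      have : ¬ lo < hi := by omega
      simp only [this, dif_neg, not_false_iff]
      exact ⟨by omega, fun j hj hjlo => hlow j hj hjlo, fun j hj hloj => hhigh j hj (hEq ▸ hloj)⟩
  | succ n ih =>
      intro lo hi hfl hlh hhl hlow hhigh
      rw [pvBisectB]
      by_cases h : lo < hi
      · simp only [h, dif_pos]
        have hmidlt : (lo + hi) / 2 < items.length := by omega
        have hget : items.getD ((lo + hi) / 2) (0, 0) = items[(lo + hi) / 2] :=
          List.getD_eq_getElem items (0, 0) hmidlt
        rw [hget]
        by_cases hc : slot < items[(lo + hi) / 2].2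
        · simp only [hc, if_pos]
          refine ih lo ((lo + hi) / 2) (by omega) (by omega) (by omega) hlow ?_
          intro j hj hmj
          exact lt_of_lt_of_le hc (pv_mono items hp hj hmj)
        · simp only [hc, if_neg, not_false_iff]
          refine ih ((lo + hi) / 2 + 1) hi (by omega) (by omega) hhl ?_ hhigh
          intro j hj hjm
          have hjle : j ≤ (lo + hi) / 2 := by omega
          exact le_trans (pv_mono items hp hmidlt hjle) (le_of_not_gt hc)
      · simp only [h, dif_neg, not_false_iff]
        have hEq : lo = hi := by omega
        exact ⟨by omega, fun j hj hjlo => hlow j hj hjlo, fun j hj hloj => hhigh j hj (hEq ▸ hloj)⟩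

-- A's linear scan, characterised by the insertion point pos
lemma pvLoopA_eq (slot : Int) :
    ∀ (l : List (Int × Int)) (pos : Nat) (prev last : Int),
    pos ≤ l.length →
    (∀ j (hj : j < l.length), j < pos → l[j].2 ≤ slot) →
    (∀ j (hj : j < l.length), pos ≤ j → slot < l[j].2) →
    pvLoopA slot l prev last =
      if pos = l.length then last
      else if pos = 0 then prev
      else (l.getD (pos - 1) (0, 0)).1 := by
  intro l
  induction l with
  | nil =>
      intro pos prev last hle _ _
      have : pos = 0 := by simpa using hle
      simp [pvLoopA, this]
  | cons p rest ih =>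
      intro pos prev last hle hlow hhigh
      obtain ⟨k, v⟩ := p
      by_cases hc : slot < v
      · have hpos0 : pos = 0 := by
          by_contra hne
          have h0 : (0 : Nat) < pos := Nat.pos_of_ne_zero hne
          have := hlow 0 (by simp) h0
          simp at this; omega
        subst hpos0
        have : (0 : Nat) ≠ ((k, v) :: rest).length := by simp
        simp [pvLoopA, hc]
      · have hpos1 : 1 ≤ pos := by
          by_contra hne
          have := hhigh 0 (by simp) (by omega)
          simp at this; omega
        have hA : pvLoopA slot ((k, v) :: rest) prev last = pvLoopA slot rest k last := by
          simp [pvLoopA, hc]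
        rw [hA, ih (pos - 1) k last (by simp at hle; omega)
          (fun j hj hjp => by
            have := hlow (j + 1) (by simp; omega) (by omega)
            simpa using this)
          (fun j hj hpj => by
            have := hhigh (j + 1) (by simp; omega) (by omega)
            simpa using this)]
        by_cases hend : pos = ((k, v) :: rest).length
        · have : pos - 1 = rest.length := by simp at hend ⊢; omega
          rw [if_pos hend]
          simp [this]
        · have hnr : pos - 1 ≠ rest.length := by simp at hend ⊢; omega
          simp only [hnr, if_neg, not_false_iff, hend]
          by_cases h1 : pos = 1
          · simp [h1]
          · have hp1 : pos - 1 ≠ 0 := by omega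
            have hpn0 : pos ≠ 0 := by omega
            have hsucc : pos - 1 = (pos - 2) + 1 := by omega
            simp only [hp1, if_neg, not_false_iff, hpn0]
            rw [hsucc, List.getD_cons_succ]
            simp

theorem cummulative_inverse_spec_aux (cumm_freqs : List (Int × Int)) (slot : Int)
    (hpre : cumm_freqs ≠ []) :
    cummulative_inverse cumm_freqs slot = cummulative_inverse_alt cumm_freqs slot := by
  unfold cummulative_inverse cummulative_inverse_alt
  set items := PySem.List.sorted (PySem.Dict.ofList cumm_freqs).items (fun x => x.2) with hitems
  change (match PySem.List.pyGet? items 0, PySem.List.pyGet? items (-1) with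
    | some first, some last => pvLoopA slot items first.1 last.1
    | _, _ => 0) =
    (match PySem.List.pyGet? items (max ((pvBisectB items slot 0 items.length : Int) - 1) 0) with
    | some p => p.1
    | none => 0)
  have hne : items ≠ [] := by
    rw [hitems, Ne, PySem.List.sorted_eq_nil_iff]
    exact pv_ofList_items_ne cumm_freqs hpre
  have hlen : 0 < items.length := List.length_pos_iff.mpr hne
  have hp : List.Pairwise (fun a b : Int × Int => a.2 ≤ b.2) items :=
    PySem.List.sorted_pairwise _ _
  -- the two pyGet? of port A succeed
  have hget0 : PySem.List.pyGet? items 0 = some (items[0]'hlen) := by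
    simp [PySem.List.pyGet?, PySem.List.pyIdx?, hlen]
  have hgetm1 : PySem.List.pyGet? items (-1) =
      some (items[items.length - 1]'(by omega)) := by
    have h1 : (1 : Int) ≤ (items.length : Int) := by exact_mod_cast hlen
    simp only [PySem.List.pyGet?, PySem.List.pyIdx?]
    rw [if_neg (by omega), if_pos (by omega)]
    simp [List.getElem?_eq_getElem (by omega : items.length - 1 < items.length)]
  rw [hget0, hgetm1]
  dsimp only
  -- binary-search insertion point and its characterisation
  set pos := pvBisectB items slot 0 items.length with hpos
  obtain ⟨hple, hlow, hhigh⟩ :=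
    pvBisectB_spec items slot hp items.length 0 items.length (by omega) (by omega) (le_refl _)
      (fun j hj hj0 => absurd hj0 (by omega))
      (fun j hj hlej => absurd hj (by omega))
  rw [pvLoopA_eq slot items pos _ _ hple hlow hhigh]
  by_cases hpos0 : pos = 0
  · -- index max(-1, 0) = 0
    have hidx : max ((pos : Int) - 1) 0 = 0 := by omega
    have hposlen : pos ≠ items.length := by omega
    rw [hidx, hget0]
    dsimp only
    rw [if_neg hposlen, if_pos hpos0]
  · have h1p : 1 ≤ pos := Nat.pos_of_ne_zero hpos0
    have hidx : max ((pos : Int) - 1) 0 = ((pos - 1 : Nat) : Int) := by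
      omega
    have hlt : pos - 1 < items.length := by omega
    have hgetp : PySem.List.pyGet? items (((pos - 1 : Nat) : Int)) = some (items[pos - 1]'hlt) := by
      simp [PySem.List.pyGet?, PySem.List.pyIdx?, hlt]
    rw [hidx, hgetp]
    by_cases hend : pos = items.length
    · simp [hend]
    · simp [hend, hpos0, List.getElem?_eq_getElem hlt]

-- ===== VERDICT (by name: the statement is the Claim_ definition above) =====
theorem cummulative_inverse_spec : Claim_equal_cummulative_inverse := by
  intro cumm_freqs slot _hdom hpre
  exact cummulative_inverse_spec_aux cumm_freqs slot hpre
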